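-- pv_equiv track=rewrite | github.com/Brmanzo/esp-computer-vision | sim/util/bitwise.py | unpack_kernel_weights
-- ===== SOURCE A (Python) =====
-- def sign_extend(value: int, width: int) -> int:
--     mask = (1 << width) - 1
--     value &= mask
--     sign_bit = 1 << (width - 1)
--     return (value ^ sign_bit) - sign_bit
--
-- def unpack_terms(packed, term_bits, input_count, signed=True):
--     unpacked = []
--     mask = (1 << term_bits) - 1
--     for i in range(input_count):
--         raw = (packed >> (i * term_bits)) & mask
--
--         # Logic merge:
--         # If unsigned OR it's a single bit, take raw.
--         # Otherwise, sign_extend.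
--         if not signed or term_bits == 1:
--             unpacked.append(raw)
--         else:
--             unpacked.append(sign_extend(raw, term_bits))
--     return unpacked
--
-- def unpack_kernel_weights(packed_val: int, WW: int, OC: int, IC: int, K: int) -> list[list[list[list[int]]]]:
--     """
--     Reconstructs the 4D [OC][IC][K][K] weights matrix.
--     Logic: Unpacks a flat list of all terms, then reshapes.
--     """
--     # 1. Extract all individual signed weights into a flat 1D list
--     total_elements = OC * IC * K * K
--     flat_list = unpack_terms(packed_val, WW, total_elements)
--
--     # 2. Reshape the flat list into [OC][IC][K][K]
--     # We work backwards from the innermost dimension (K)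
--     return [
--         [
--             [
--                 flat_list[oc*IC*K*K + ic*K*K + r*K : oc*IC*K*K + ic*K*K + (r+1)*K]
--                 for r in range(K)
--             ]
--             for ic in range(IC)
--         ]
--         for oc in range(OC)
--     ]
-- ===== SOURCE B (Python) =====
-- def unpack_kernel_weights(packed_val: int, WW: int, OC: int, IC: int, K: int) -> list[list[list[list[int]]]]:
--     """Build the 4D [OC][IC][K][K] matrix directly: one fused traversal, no
--     intermediate flat list and no slicing reshape."""
--     def weight(idx):
--         raw = (packed_val >> (idx * WW)) & ((1 << WW) - 1)
--         if WW == 1: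
--             return raw
--         return (raw ^ (1 << (WW - 1))) - (1 << (WW - 1))
--     return [[[[weight(((oc * IC + ic) * K + r) * K + k) for k in range(K)]
--               for r in range(K)]
--              for ic in range(IC)]
--             for oc in range(OC)]
-- ===== Notes on version B (the rewrite author's own statement) =====
-- stated objective: simpler
-- what changed: B fuses A's two phases (unpack everything into a flat list, then reshape by slicing) into a single direct construction: four nested comprehensions compute each weight from its flat bit index on the fly, with no intermediate list and no slices.
import Mathlib
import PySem

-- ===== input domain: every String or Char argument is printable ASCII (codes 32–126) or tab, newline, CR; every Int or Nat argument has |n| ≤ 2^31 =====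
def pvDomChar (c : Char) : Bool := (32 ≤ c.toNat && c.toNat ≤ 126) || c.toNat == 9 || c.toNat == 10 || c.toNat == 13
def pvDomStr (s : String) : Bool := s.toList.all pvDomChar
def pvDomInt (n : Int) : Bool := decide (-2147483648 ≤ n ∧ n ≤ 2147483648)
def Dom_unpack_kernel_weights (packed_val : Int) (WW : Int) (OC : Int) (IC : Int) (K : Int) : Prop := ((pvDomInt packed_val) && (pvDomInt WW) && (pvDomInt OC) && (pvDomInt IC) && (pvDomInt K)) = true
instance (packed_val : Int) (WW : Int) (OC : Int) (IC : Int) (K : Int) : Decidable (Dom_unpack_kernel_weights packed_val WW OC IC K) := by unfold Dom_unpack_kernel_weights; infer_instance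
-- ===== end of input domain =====

-- B builds the 4-D matrix directly (one fused traversal, each weight computed from its flat
-- bit index); A unpacks a flat list first and reshapes it by slicing.  Objective: simpler.

-- ===== PORT A =====
def sign_extend (value : Int) (width : Int) : Int :=
  let mask : Int := (1 <<< width.toNat) - 1
  let value := PySem.Int.band value mask
  let sign_bit : Int := 1 <<< (width - 1).toNat
  (PySem.Int.bxor value sign_bit) - sign_bit

def unpack_terms (packed : Int) (term_bits : Int) (input_count : Int) (signed : Bool) : List Int :=
  let mask : Int := (1 <<< term_bits.toNat) - 1
  (PySem.List.pyRange 0 input_count 1).foldl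
    (fun unpacked i =>
      let raw := PySem.Int.band (packed >>> (i * term_bits).toNat) mask
      unpacked ++ [if !signed || term_bits == 1 then raw else sign_extend raw term_bits])
    []

def unpack_kernel_weights (packed_val : Int) (WW : Int) (OC : Int) (IC : Int) (K : Int) : List (List (List (List Int))) :=
  let total_elements := OC * IC * K * K
  let flat_list := unpack_terms packed_val WW total_elements true
  (PySem.List.pyRange 0 OC 1).map fun oc =>
    (PySem.List.pyRange 0 IC 1).map fun ic =>
      (PySem.List.pyRange 0 K 1).map fun r =>
        PySem.List.slice flat_list (some (oc*IC*K*K + ic*K*K + r*K)) (some (oc*IC*K*K + ic*K*K + (r+1)*K))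

-- ===== PORT B =====
def pvWeight (packed_val : Int) (WW : Int) (idx : Int) : Int :=
  let raw := PySem.Int.band (packed_val >>> (idx * WW).toNat) ((1 <<< WW.toNat) - 1)
  if WW == 1 then raw
  else (PySem.Int.bxor raw (1 <<< (WW - 1).toNat)) - (1 <<< (WW - 1).toNat)

def unpack_kernel_weights_alt (packed_val : Int) (WW : Int) (OC : Int) (IC : Int) (K : Int) : List (List (List (List Int))) :=
  (PySem.List.pyRange 0 OC 1).map fun oc =>
    (PySem.List.pyRange 0 IC 1).map fun ic =>
      (PySem.List.pyRange 0 K 1).map fun r =>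
        (PySem.List.pyRange 0 K 1).map fun k =>
          pvWeight packed_val WW (((oc * IC + ic) * K + r) * K + k)

-- ===== PRECONDITION & SPEC =====
-- Pre_ excludes exactly the inputs where A raises ValueError('negative shift count'):
-- a negative WW, or WW = 0 with a positive element count (sign_extend then shifts by WW-1 = -1).
def Pre_unpack_kernel_weights (packed_val : Int) (WW : Int) (OC : Int) (IC : Int) (K : Int) : Prop :=
  0 ≤ WW ∧ (WW = 0 → OC * IC * K * K ≤ 0)
instance (packed_val : Int) (WW : Int) (OC : Int) (IC : Int) (K : Int) : Decidable (Pre_unpack_kernel_weights packed_val WW OC IC K) := by unfold Pre_unpack_kernel_weights; infer_instance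

def pvWitness_unpack_kernel_weights : Int × Int × Int × Int × Int := (874, 3, 1, 2, 2)

def Spec_unpack_kernel_weights (packed_val : Int) (WW : Int) (OC : Int) (IC : Int) (K : Int) (out : List (List (List (List Int)))) : Prop := out = unpack_kernel_weights_alt packed_val WW OC IC K
instance (packed_val : Int) (WW : Int) (OC : Int) (IC : Int) (K : Int) (out : List (List (List (List Int)))) : Decidable (Spec_unpack_kernel_weights packed_val WW OC IC K out) := by unfold Spec_unpack_kernel_weights; infer_instance

-- ===== CLAIM (what is proved, stated in full; the proofs are below) =====
def Claim_equal_unpack_kernel_weights : Prop := ∀ (packed_val : Int) (WW : Int) (OC : Int) (IC : Int) (K : Int), Dom_unpack_kernel_weights packed_val WW OC IC K → Pre_unpack_kernel_weights packed_val WW OC IC K → Spec_unpack_kernel_weights packed_val WW OC IC K (unpack_kernel_weights packed_val WW OC IC K)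


-- ===== LEMMAS AND PROOFS =====

-- masking with the low-bits mask (M - 1 for M = 2^w) is reduction mod M (any sign of x)
lemma pv_band_mask_aux (x : Int) (M : Nat) (hM : 0 < M)
    (hand : ∀ z : Nat, z &&& (M - 1) = z % M) :
    PySem.Int.band x ((M : Int) - 1) = PySem.Int.mod x (M : Int) := by
  have hMI : (0:Int) < (M : Int) := by exact_mod_cast hM
  rw [PySem.Int.mod_eq_emod_of_pos hMI]
  by_cases hx : 0 ≤ x
  · rw [PySem.Int.band_of_nonneg hx (by omega)]
    have h1 : ((M : Int) - 1).toNat = M - 1 := by omega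
    have hx' : x = ((x.toNat : Nat) : Int) := by omega
    rw [h1, hand, hx', ← Int.natCast_mod]
    simp
  · push_neg at hx
    simp only [PySem.Int.band]
    rw [if_neg (by omega), if_pos (by omega)]
    have h1 : ((M : Int) - 1).toNat = M - 1 := by omega
    rw [h1, Nat.land_comm, hand]
    set y : Nat := (-x - 1).toNat with hy
    have hyI : (y : Int) = -x - 1 := by omega
    have hmod : x % (M : Int) = (M : Int) - 1 - ((y : Int) % (M : Int)) := by
      have h := Int.ediv_add_emod (y : Int) (M : Int)
      have hx2 : x = (M : Int) - 1 - (y : Int) % (M : Int)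
          + (M : Int) * (-((y : Int) / (M : Int)) - 1) := by linear_combination h + hyI
      have hb1 : 0 ≤ (y : Int) % (M : Int) := Int.emod_nonneg _ (by omega)
      have hb2 : (y : Int) % (M : Int) < (M : Int) := Int.emod_lt_of_pos _ hMI
      conv_lhs => rw [hx2]
      rw [Int.add_mul_emod_self_left, Int.emod_eq_of_lt (by linarith) (by linarith)]
    rw [hmod, ← Int.natCast_mod]
    have : y % M < M := Nat.mod_lt _ hM
    omega

lemma pv_band_mask (x : Int) (w : Nat) :
    PySem.Int.band x (((1 <<< w : Nat) : Int) - 1) = PySem.Int.mod x ((2 ^ w : Nat) : Int) := by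
  rw [show (1 <<< w : Nat) = 2 ^ w from Nat.one_shiftLeft w]
  exact pv_band_mask_aux x (2 ^ w) (by positivity) (fun z => Nat.and_two_pow_sub_one_eq_mod z w)

lemma pv_mod_mod (x : Int) (N : Int) (hN : 0 < N) :
    PySem.Int.mod (PySem.Int.mod x N) N = PySem.Int.mod x N := by
  rw [PySem.Int.mod_eq_emod_of_pos hN, PySem.Int.mod_eq_emod_of_pos hN,
      Int.emod_emod_of_dvd _ dvd_rfl]

-- A's per-element rule (signed, as called) as a function of the flat index
def pvAelem (packed : Int) (term_bits : Int) (i : Int) : Int :=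
  let raw := PySem.Int.band (packed >>> (i * term_bits).toNat) ((1 <<< term_bits.toNat) - 1)
  if !true || term_bits == 1 then raw else sign_extend raw term_bits

lemma unpack_terms_eq_map (p tb n : Int) :
    unpack_terms p tb n true = (PySem.List.pyRange 0 n 1).map (pvAelem p tb) := by
  simp only [unpack_terms]
  rw [PySem.List.foldl_append_singleton_eq_map]
  simp [pvAelem]

-- A's element rule agrees with B's weight rule whenever 1 ≤ WW
lemma pv_elem (p WW i : Int) : pvAelem p WW i = pvWeight p WW i := by
  unfold pvAelem pvWeight sign_extend
  simp only [Bool.not_true, Bool.false_or]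
  by_cases h1 : WW = 1
  · simp [h1]
  · have hne : (WW == 1) = false := by simp [h1]
    simp only [hne, Bool.false_eq_true, if_false]
    rw [pv_band_mask, pv_band_mask, pv_mod_mod _ _ (by positivity)]

lemma pv_slice_map (f : Int → Int) (n a len : Int) (ha : 0 ≤ a) (hl : 0 ≤ len)
    (hab : a + len ≤ n) :
    PySem.List.slice ((PySem.List.pyRange 0 n 1).map f) (some a) (some (a + len))
      = (PySem.List.pyRange 0 len 1).map (fun k => f (a + k)) := by
  rw [PySem.List.slice_toNat _ ha (by omega),
      PySem.List.pyRange_one_append 0 a n ha (by omega),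
      PySem.List.pyRange_one_append a (a + len) n (by omega) hab,
      List.map_append, List.map_append,
      List.drop_left' (by simp [PySem.List.length_pyRange_one]),
      show (a + len).toNat - a.toNat = len.toNat from by omega,
      List.take_left' (by simp [PySem.List.length_pyRange_one]),
      PySem.List.pyRange_one a (a + len), PySem.List.pyRange_one 0 len]
  simp only [List.map_map, show a + len - a = len from by ring, sub_zero]
  apply List.map_congr_left
  intro k _
  simp

-- ===== VERDICT (by name: the statement is the Claim_ definition above) =====
theorem unpack_kernel_weights_spec : Claim_equal_unpack_kernel_weights := by
  intro p WW OC IC K _hdom _hpre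
  unfold Spec_unpack_kernel_weights
  simp only [unpack_kernel_weights, unpack_kernel_weights_alt]
  rw [unpack_terms_eq_map]
  apply List.map_congr_left; intro oc hoc
  apply List.map_congr_left; intro ic hic
  apply List.map_congr_left; intro r hr
  rw [PySem.List.mem_pyRange_one] at hoc hic hr
  have hKK : (0:Int) ≤ K * K := mul_nonneg (by omega) (by omega)
  have hIKK : (0:Int) ≤ IC * (K * K) := mul_nonneg (by omega) hKK
  have e1 : (r + 1) * K ≤ K * K := mul_le_mul_of_nonneg_right (by omega) (by omega)
  have e2 : (ic + 1) * (K * K) ≤ IC * (K * K) := mul_le_mul_of_nonneg_right (by omega) hKK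
  have e3 : (oc + 1) * (IC * (K * K)) ≤ OC * (IC * (K * K)) :=
    mul_le_mul_of_nonneg_right (by omega) hIKK
  have hbase : 0 ≤ oc * IC * K * K + ic * K * K + r * K := by nlinarith
  have hub : (oc * IC * K * K + ic * K * K + r * K) + K ≤ OC * IC * K * K := by nlinarith
  rw [show oc * IC * K * K + ic * K * K + (r + 1) * K
        = (oc * IC * K * K + ic * K * K + r * K) + K from by ring,
      pv_slice_map _ _ _ _ hbase (by omega) hub]
  apply List.map_congr_left
  intro k _
  rw [pv_elem,
      show oc * IC * K * K + ic * K * K + r * K + k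
        = ((oc * IC + ic) * K + r) * K + k from by ring]
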